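-- pv_equiv track=rewrite | github.com/borget-5202/add_db_feature | db_features/app/games/core/game_core.py | score_expression_complexity
-- ===== SOURCE A (Python) =====
-- def score_expression_complexity(expr: str) -> int:
--     """
--     Very lightweight heuristic:
--       +,- = 1; *,/ = 2; ^ = 4; parentheses ignored.
--     """
--     s = (expr or "").replace(" ", "")
--     score = 0
--     for ch in s:
--         if ch in "+-": score += 1
--         elif ch in "*/": score += 2
--         elif ch == "^": score += 4
--     return score
-- ===== SOURCE B (Python) =====
-- def score_expression_complexity(expr: str) -> int:
--     """
--     Very lightweight heuristic:
--       +,- = 1; *,/ = 2; ^ = 4; parentheses ignored.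
--     """
--     s = expr or ""
--     return (s.count("+") + s.count("-")
--             + 2 * (s.count("*") + s.count("/"))
--             + 4 * s.count("^"))
-- ===== Notes on version B (the rewrite author's own statement) =====
-- stated objective: faster
-- what changed: Replaces the space-stripping pass and the single branching per-character loop with a closed-form weighted sum of per-operator str.count scans (spaces need not be removed since only operator characters are counted).
import Mathlib
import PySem

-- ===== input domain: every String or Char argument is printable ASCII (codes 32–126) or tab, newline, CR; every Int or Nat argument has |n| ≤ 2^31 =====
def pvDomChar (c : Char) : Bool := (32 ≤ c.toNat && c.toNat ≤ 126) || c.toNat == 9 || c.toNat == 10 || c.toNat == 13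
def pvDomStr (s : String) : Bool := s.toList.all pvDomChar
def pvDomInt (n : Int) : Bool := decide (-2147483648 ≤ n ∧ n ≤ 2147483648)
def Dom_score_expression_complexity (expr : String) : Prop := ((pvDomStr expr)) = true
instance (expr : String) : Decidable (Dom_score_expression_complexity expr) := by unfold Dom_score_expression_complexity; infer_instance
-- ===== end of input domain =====

-- B replaces the space-stripping pass plus the branching per-character loop by a
-- closed-form weighted sum of per-operator count scans (objective: simpler).

-- ===== PORT A =====
def score_expression_complexity (expr : String) : Int :=
  -- s = (expr or "").replace(" ", "")   ('expr or ""' is the identity on a String)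
  let s := PySem.Str.replace expr " " ""
  s.toList.foldl (fun score ch =>
    if ch == '+' || ch == '-' then score + 1
    else if ch == '*' || ch == '/' then score + 2
    else if ch == '^' then score + 4
    else score) 0

-- ===== PORT B =====
def score_expression_complexity_alt (expr : String) : Int :=
  -- s = expr or ""   (identity on a String)
  let s := expr
  (PySem.Str.count s "+" : Int) + (PySem.Str.count s "-" : Int)
    + 2 * ((PySem.Str.count s "*" : Int) + (PySem.Str.count s "/" : Int))
    + 4 * (PySem.Str.count s "^" : Int)

-- ===== PRECONDITION & SPEC =====
def Spec_score_expression_complexity (expr : String) (out : Int) : Prop := out = score_expression_complexity_alt expr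
instance (expr : String) (out : Int) : Decidable (Spec_score_expression_complexity expr out) := by unfold Spec_score_expression_complexity; infer_instance

-- ===== CLAIM (what is proved, stated in full; the proofs are below) =====
def Claim_equal_score_expression_complexity : Prop := ∀ (expr : String), Dom_score_expression_complexity expr → Spec_score_expression_complexity expr (score_expression_complexity expr)

-- ===== LEMMAS AND PROOFS =====

-- Python str.count with a single-character needle is List.count.
theorem pv_count_go_single (c : Char) : ∀ (fuel : Nat) (l : List Char) (acc : Nat),
    l.length ≤ fuel → PySem.Chars.count.go [c] fuel l acc = acc + l.count c := by
  intro fuel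
  induction fuel with
  | zero =>
    intro l acc h
    have : l = [] := List.eq_nil_of_length_eq_zero (Nat.le_zero.mp h)
    subst this
    simp [PySem.Chars.count.go]
  | succ n ih =>
    intro l acc h
    cases l with
    | nil => simp [PySem.Chars.count.go]
    | cons a t =>
      by_cases hc : a = c
      · subst hc
        have hpre : List.isPrefixOf [a] (a :: t) = true := by
          simp [List.isPrefixOf]
        simp only [PySem.Chars.count.go, hpre, if_pos]
        have : List.drop (List.length [a]) (a :: t) = t := by simp
        rw [this, ih t (acc + 1) (by simpa using Nat.lt_succ_iff.mp (by simpa using h))]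
        simp
        omega
      · have hpre : List.isPrefixOf [c] (a :: t) = false := by
          simp [List.isPrefixOf]
          intro hac
          exact absurd hac.symm hc
        simp only [PySem.Chars.count.go, hpre, Bool.false_eq_true, if_false]
        rw [ih t acc (by simpa using Nat.lt_succ_iff.mp (by simpa using h))]
        simp [hc]

theorem pv_count_single (l : List Char) (c : Char) :
    PySem.Chars.count l [c] = l.count c := by
  simp [PySem.Chars.count]
  have := pv_count_go_single c l.length l 0 (le_refl _)
  omega

-- replacing " " with "" is filtering out spaces
theorem pv_replace_go_space : ∀ (fuel : Nat) (l acc : List Char), l.length ≤ fuel →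
    PySem.Chars.replace.go [' '] [] fuel l acc = acc.reverse ++ l.filter (· != ' ') := by
  intro fuel
  induction fuel with
  | zero =>
    intro l acc h
    have : l = [] := List.eq_nil_of_length_eq_zero (Nat.le_zero.mp h)
    subst this
    simp [PySem.Chars.replace.go]
  | succ n ih =>
    intro l acc h
    cases l with
    | nil => simp [PySem.Chars.replace.go]
    | cons a t =>
      have ht : t.length ≤ n := Nat.lt_succ_iff.mp (by simpa using h)
      by_cases hsp : a = ' '
      · subst hsp
        have hpre : List.isPrefixOf [' '] (' ' :: t) = true := by
          simp [List.isPrefixOf]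
        simp only [PySem.Chars.replace.go, hpre, if_pos]
        have hdrop : List.drop (List.length [' ']) (' ' :: t) = t := by simp
        rw [hdrop]
        rw [show (([] : List Char).reverse ++ acc) = acc by simp]
        rw [ih t acc ht]
        simp
      · have hpre : List.isPrefixOf [' '] (a :: t) = false := by
          simp [List.isPrefixOf]
          intro hac
          exact absurd hac.symm hsp
        simp only [PySem.Chars.replace.go, hpre, Bool.false_eq_true, if_false]
        rw [ih t (a :: acc) ht]
        simp [hsp]

theorem pv_replace_space (l : List Char) :
    PySem.Chars.replace l [' '] [] = l.filter (· != ' ') := by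
  have := pv_replace_go_space l.length l [] (le_refl _)
  simpa [PySem.Chars.replace] using this

-- A's loop computes the weighted sum of per-operator counts.
theorem pv_fold_counts (l : List Char) : ∀ (acc : Int),
    l.foldl (fun score ch =>
      if ch == '+' || ch == '-' then score + 1
      else if ch == '*' || ch == '/' then score + 2
      else if ch == '^' then score + 4
      else score) acc
    = acc + (l.count '+' : Int) + (l.count '-' : Int)
        + 2 * ((l.count '*' : Int) + (l.count '/' : Int))
        + 4 * (l.count '^' : Int) := by
  induction l with
  | nil => intro acc; simp
  | cons a t ih =>
    intro acc
    simp only [List.foldl_cons, List.count_cons]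
    rw [ih]
    by_cases h1 : a = '+'
    · subst h1; simp; ring
    · by_cases h2 : a = '-'
      · subst h2; simp; ring
      · by_cases h3 : a = '*'
        · subst h3; simp; ring
        · by_cases h4 : a = '/'
          · subst h4; simp; ring
          · by_cases h5 : a = '^'
            · subst h5; simp; ring
            · simp [h1, h2, h3, h4, h5]

-- counting an operator ignores the removed spaces
theorem pv_count_filter (l : List Char) (c : Char) (h : c ≠ ' ') :
    (l.filter (· != ' ')).count c = l.count c := by
  apply List.count_filter
  simp [h]

-- ===== VERDICT (by name: the statement is the Claim_ definition above) =====
theorem score_expression_complexity_spec : Claim_equal_score_expression_complexity := by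
  intro expr _
  unfold Spec_score_expression_complexity
  unfold score_expression_complexity score_expression_complexity_alt
  simp only [PySem.Str.count_eq, PySem.Str.toList_replace]
  have hsp : (" " : String).toList = [' '] := rfl
  have hemp : ("" : String).toList = [] := rfl
  rw [hsp, hemp, pv_replace_space, pv_fold_counts]
  rw [pv_count_filter _ '+' (by decide), pv_count_filter _ '-' (by decide),
      pv_count_filter _ '*' (by decide), pv_count_filter _ '/' (by decide),
      pv_count_filter _ '^' (by decide)]
  have h1 := pv_count_single expr.toList '+'
  have h2 := pv_count_single expr.toList '-'
  have h3 := pv_count_single expr.toList '*'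
  have h4 := pv_count_single expr.toList '/'
  have h5 := pv_count_single expr.toList '^'
  have t1 : ("+" : String).toList = ['+'] := rfl
  have t2 : ("-" : String).toList = ['-'] := rfl
  have t3 : ("*" : String).toList = ['*'] := rfl
  have t4 : ("/" : String).toList = ['/'] := rfl
  have t5 : ("^" : String).toList = ['^'] := rfl
  rw [t1, t2, t3, t4, t5, h1, h2, h3, h4, h5]
  ring
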